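-- pv_equiv track=rewrite | github.com/stat-thon/Coding-Test-Study-2nd | Dawny/Programmers/18TH/didimdol.py | solution
-- ===== SOURCE A (Python) =====
-- def solution(stones, k):
--     start = 1
--     end = max(stones)
--
--     while start <= end:
--         cnt = 0
--         mid = (start + end) // 2
--         for stone in stones:
--             if stone <= mid:
--                 cnt += 1
--             else:
--                 cnt = 0
--
--             if cnt == k:
--                 break
--         if cnt < k:
--             start = mid + 1
--         else:
--             dab = mid
--             end = mid - 1
--
--     return dab
-- ===== SOURCE B (Python) =====
-- def solution(stones, k):
--     # O(n) block decomposition: window max = max(suffix-max of left block, prefix-max of right block);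
--     # the answer is the minimum of the window maxima, clamped below at 1 because the searched
--     # level range is [1, max(stones)].
--     n = len(stones)
--     pre = [0] * n  # pre[i] = max of stones from the start of i's k-block through i
--     for i in range(n):
--         pre[i] = stones[i] if i % k == 0 else max(pre[i - 1], stones[i])
--     suf = [0] * n  # suf[i] = max of stones from i through the end of i's k-block (clipped at n-1)
--     for i in range(n - 1, -1, -1):
--         suf[i] = stones[i] if i % k == k - 1 or i == n - 1 else max(suf[i + 1], stones[i])
--     best = max(suf[0], pre[k - 1])
--     for i in range(1, n - k + 1):
--         c = max(suf[i], pre[i + k - 1])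
--         if c < best:
--             best = c
--     return max(1, best)
-- ===== Notes on version B (the rewrite author's own statement) =====
-- stated objective: alternative
-- what changed: A binary-searches the answer value, rescanning all stones for a run of k stones <= mid at each step; B computes every window maximum directly in three linear passes (k-block prefix/suffix maxima) and returns the minimum of them clamped below at 1, the bottom of A's searched range.
-- outside the precondition, e.g. on solution([3, 1, 2], 0): A returns 1, B raises ZeroDivisionError; on solution([3, 1, 2], -2): A returns 1, B raises IndexError
import Mathlib
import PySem

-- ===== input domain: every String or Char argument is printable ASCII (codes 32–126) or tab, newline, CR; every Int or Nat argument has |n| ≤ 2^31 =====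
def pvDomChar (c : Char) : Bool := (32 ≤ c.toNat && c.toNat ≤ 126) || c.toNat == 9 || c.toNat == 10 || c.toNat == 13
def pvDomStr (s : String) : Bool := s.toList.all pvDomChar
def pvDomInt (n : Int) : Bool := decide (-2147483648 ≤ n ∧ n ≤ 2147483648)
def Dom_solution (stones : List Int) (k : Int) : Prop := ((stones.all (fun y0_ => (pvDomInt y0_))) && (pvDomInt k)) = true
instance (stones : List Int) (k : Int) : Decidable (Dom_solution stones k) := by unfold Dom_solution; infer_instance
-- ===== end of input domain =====

-- B replaces A's binary search over the answer value (O(n log max)) by an O(n) block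
-- prefix/suffix sliding-window-maximum pass, taking the minimum of the window maxima
-- clamped below at 1 (A searches mid in [1, max(stones)]); equivalence is proved on Pre_.

-- ===== PORT A =====
-- A's inner for-loop: running count of trailing stones ≤ mid, early break at cnt == k.
def innerCnt (k mid cnt : Int) : List Int → Int
  | [] => cnt
  | s :: t =>
    let c := if s ≤ mid then cnt + 1 else (0 : Int)
    if c == k then c else innerCnt k mid c t

-- A's while-loop (binary search on mid); dab threaded as Option (none = Python's unbound dab).
def loopA (stones : List Int) (k : Int) (start e : Int) (dab : Option Int) : Option Int :=
  if h : start ≤ e then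
    let mid := PySem.Int.floordiv (start + e) 2
    if innerCnt k mid 0 stones < k then
      loopA stones k (mid + 1) e dab
    else
      loopA stones k start (mid - 1) (some mid)
  else dab
termination_by (e + 1 - start).toNat
decreasing_by
  all_goals
    have hb := PySem.Int.floordiv_two_mid_bounds (lo := start) (hi := e) h
    omega

def solution (stones : List Int) (k : Int) : Int :=
  -- Python raises on stones = [] (max) and when dab stays unbound: both surface as .getD 0
  -- here; such inputs are outside Pre_solution.
  (loopA stones k 1 ((PySem.List.max? stones (fun x => x)).getD 0) none).getD 0

-- ===== PORT B =====
-- Source B's first loop: pre[i] = stones[i] if i % k == 0 else max(pre[i-1], stones[i]).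
def buildPre (stones : List Int) (k : Int) : Nat → List Int
  | 0 => []
  | i + 1 =>
    let acc := buildPre stones k i
    acc ++ [if PySem.Int.mod (i : Int) k == 0 then stones.getD i 0
            else max (acc.getD (i - 1) 0) (stones.getD i 0)]

-- Source B's second (right-to-left) loop; buildSuf c = [suf[n-c], …, suf[n-1]].
def buildSuf (stones : List Int) (k : Int) : Nat → List Int
  | 0 => []
  | c + 1 =>
    let acc := buildSuf stones k c
    let i := stones.length - (c + 1)
    (if (PySem.Int.mod (i : Int) k == k - 1) || (i == stones.length - 1) then stones.getD i 0
     else max (acc.getD 0 0) (stones.getD i 0)) :: acc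

-- Source B's third loop: best = min over i of max(suf[i], pre[i+k-1]); t iterations after the init.
def bestLoop (suf pre : List Int) (k : Int) : Nat → Int
  | 0 => max (suf.getD 0 0) (pre.getD (k.toNat - 1) 0)
  | t + 1 =>
    let b := bestLoop suf pre k t
    let c := max (suf.getD (t + 1) 0) (pre.getD (t + k.toNat) 0)
    if c < b then c else b

def solution_alt (stones : List Int) (k : Int) : Int :=
  max 1 (bestLoop (buildSuf stones k stones.length) (buildPre stones k stones.length) k
    (stones.length - k.toNat))

-- ===== PRECONDITION & SPEC =====
-- Pre_ keeps the problem's natural domain: some stone ≥ 1 (A raises UnboundLocalError when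
-- max(stones) ≤ 0, ValueError on []) and 1 ≤ k ≤ len(stones) (A raises UnboundLocalError for
-- k > len; for k ≤ 0, where A happens to return 1, B's k-windows are meaningless and B raises).
def Pre_solution (stones : List Int) (k : Int) : Prop :=
  (∃ s ∈ stones, (1 : Int) ≤ s) ∧ 1 ≤ k ∧ k ≤ (stones.length : Int)
instance (stones : List Int) (k : Int) : Decidable (Pre_solution stones k) := by
  unfold Pre_solution; infer_instance

def pvWitness_solution : List Int × Int := ([2, 3], 1)

def Spec_solution (stones : List Int) (k : Int) (out : Int) : Prop :=
  out = solution_alt stones k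
instance (stones : List Int) (k : Int) (out : Int) : Decidable (Spec_solution stones k out) := by
  unfold Spec_solution; infer_instance

-- ===== CLAIM (what is proved, stated in full; the proofs are below) =====
def Claim_equal_solution : Prop := ∀ (stones : List Int) (k : Int), Dom_solution stones k → Pre_solution stones k → Spec_solution stones k (solution stones k)

-- ===== LEMMAS AND PROOFS =====

-- max of g over the segment [i, i+c] (c+1 elements)
def segMax (g : Nat → Int) (i : Nat) : Nat → Int
  | 0 => g i
  | c + 1 => max (segMax g i c) (g (i + c + 1))

-- min of f over [0, t]
def winMin (f : Nat → Int) : Nat → Int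
  | 0 => f 0
  | t + 1 => min (winMin f t) (f (t + 1))

def gOf (stones : List Int) : Nat → Int := fun j => stones.getD j 0

-- the value both programs are about: min over window starts of the window max
def mval (stones : List Int) (K : Nat) : Int :=
  winMin (fun i => segMax (gOf stones) i (K - 1)) (stones.length - K)

-- end index (clipped) of the k-block containing i, as used by suf
def eIdx (K n i : Nat) : Nat := min (K * (i / K) + K - 1) (n - 1)

-- some window of K consecutive elements of l is entirely ≤ mid
def Swin (K : Nat) (mid : Int) (l : List Int) : Prop :=
  ∃ i, i + K ≤ l.length ∧ ∀ x ∈ (l.drop i).take K, x ≤ mid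

theorem segMax_cons (g : Nat → Int) (i c : Nat) :
    segMax g i (c + 1) = max (g i) (segMax g (i + 1) c) := by
  induction c with
  | zero => simp [segMax]
  | succ c ih =>
    show max (segMax g i (c+1)) (g (i + (c+1) + 1)) = _
    rw [ih, max_assoc]
    have : i + (c + 1) + 1 = (i + 1) + c + 1 := by omega
    rw [this]
    rfl

theorem le_segMax (g : Nat → Int) (i c j : Nat) (hj : j ≤ c) : g (i + j) ≤ segMax g i c := by
  induction c with
  | zero => simp_all [segMax]
  | succ c ih =>
    show _ ≤ max (segMax g i c) (g (i + c + 1))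
    rcases Nat.lt_or_ge j (c+1) with h | h
    · exact le_trans (ih (by omega)) (le_max_left _ _)
    · have : j = c + 1 := by omega
      subst this
      exact le_trans (le_of_eq (by ring_nf)) (le_max_right _ _)

theorem segMax_le_iff (g : Nat → Int) (i c : Nat) (x : Int) :
    segMax g i c ≤ x ↔ ∀ j ≤ c, g (i + j) ≤ x := by
  constructor
  · intro h j hj; exact le_trans (le_segMax g i c j hj) h
  · intro h
    induction c with
    | zero => simpa [segMax] using h 0 (by omega)
    | succ c ih =>
      show max _ _ ≤ x
      refine max_le (ih (fun j hj => h j (by omega))) ?_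
      simpa using h (c+1) (by omega)

theorem segMax_mem (g : Nat → Int) (i c : Nat) : ∃ j ≤ c, segMax g i c = g (i + j) := by
  induction c with
  | zero => exact ⟨0, le_refl _, rfl⟩
  | succ c ih =>
    obtain ⟨j, hj, hEq⟩ := ih
    show ∃ j' ≤ c + 1, max (segMax g i c) (g (i + c + 1)) = g (i + j')
    rcases max_cases (segMax g i c) (g (i + c + 1)) with ⟨h1, _⟩ | ⟨h1, _⟩
    · exact ⟨j, by omega, by rw [h1, hEq]⟩
    · exact ⟨c + 1, le_refl _, by rw [h1]; ring_nf⟩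

theorem segMax_union (g : Nat → Int) {i b a d : Nat}
    (hib : i ≤ b) (hba : b ≤ a + 1) (hia : i ≤ a) (had : a ≤ d) (hbd : b ≤ d) :
    max (segMax g i (a - i)) (segMax g b (d - b)) = segMax g i (d - i) := by
  apply le_antisymm
  · refine max_le ?_ ?_
    · rw [segMax_le_iff]
      intro j hj
      exact le_segMax g i (d - i) j (by omega)
    · rw [segMax_le_iff]
      intro j hj
      have h1 : b + j = i + (b + j - i) := by omega
      rw [h1]
      exact le_segMax g i (d - i) _ (by omega)
  · obtain ⟨j, hj, hEq⟩ := segMax_mem g i (d - i)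
    rw [hEq]
    rcases Nat.lt_or_ge (i + j) (a + 1) with h | h
    · exact le_trans (le_segMax g i (a - i) j (by omega)) (le_max_left _ _)
    · have h1 : i + j = b + (i + j - b) := by omega
      rw [h1]
      exact le_trans (le_segMax g b (d - b) _ (by omega)) (le_max_right _ _)

theorem winMin_le (f : Nat → Int) {i t : Nat} (h : i ≤ t) : winMin f t ≤ f i := by
  induction t with
  | zero => simp_all [winMin]
  | succ t ih =>
    show min (winMin f t) (f (t+1)) ≤ f i
    rcases Nat.lt_or_ge i (t+1) with h' | h'
    · exact le_trans (min_le_left _ _) (ih (by omega))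
    · have : i = t + 1 := by omega
      subst this
      exact min_le_right _ _

theorem winMin_mem (f : Nat → Int) (t : Nat) : ∃ i ≤ t, winMin f t = f i := by
  induction t with
  | zero => exact ⟨0, le_refl _, rfl⟩
  | succ t ih =>
    obtain ⟨i, hi, hEq⟩ := ih
    show ∃ i' ≤ t + 1, min (winMin f t) (f (t+1)) = f i'
    rcases min_cases (winMin f t) (f (t+1)) with ⟨h1, _⟩ | ⟨h1, _⟩
    · exact ⟨i, by omega, by rw [h1, hEq]⟩
    · exact ⟨t + 1, le_refl _, h1⟩

theorem winMin_congr (f f' : Nat → Int) (t : Nat) (h : ∀ i ≤ t, f i = f' i) :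
    winMin f t = winMin f' t := by
  induction t with
  | zero => simpa [winMin] using h 0 (by omega)
  | succ t ih =>
    show min (winMin f t) (f (t+1)) = min (winMin f' t) (f' (t+1))
    rw [ih (fun i hi => h i (by omega)), h (t+1) (le_refl _)]

theorem pred_div {K i : Nat} (hK : 0 < K) (h : i % K ≠ 0) : (i - 1) / K = i / K := by
  have hdm := Nat.div_add_mod i K
  have hlt := Nat.mod_lt i hK
  have h1 : i - 1 = (i % K - 1) + K * (i / K) := by omega
  rw [h1, Nat.add_mul_div_left _ _ hK, Nat.div_eq_of_lt (by omega)]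
  omega

theorem buildPre_len (stones : List Int) (k : Int) (t : Nat) : (buildPre stones k t).length = t := by
  induction t with
  | zero => rfl
  | succ t ih => simp [buildPre, ih]

theorem buildPre_spec (stones : List Int) (k : Int) (hk : 1 ≤ k) (t : Nat) :
    ∀ j < t, (buildPre stones k t).getD j 0
      = segMax (gOf stones) (k.toNat * (j / k.toNat)) (j - k.toNat * (j / k.toNat)) := by
  set K := k.toNat with hKdef
  have hK : 0 < K := by omega
  have hkK : (K : Int) = k := by omega
  induction t with
  | zero => intro j hj; omega
  | succ t ih =>
    intro j hj
    show (buildPre stones k t ++ [_]).getD j 0 = _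
    rcases Nat.lt_or_ge j t with h | h
    · rw [List.getD_append _ _ _ _ (by rw [buildPre_len]; omega)]
      exact ih j h
    · have hjt : j = t := by omega
      subst hjt
      rw [List.getD_append_right _ _ _ _ (by rw [buildPre_len])]
      rw [buildPre_len]
      simp only [Nat.sub_self, List.getD_cons_zero]
      rw [show PySem.Int.mod (j : Int) k = ((j % K : Nat) : Int) from by
        rw [← hkK, PySem.Int.mod_natCast]]
      have hdm := Nat.div_add_mod j K
      have hlt := Nat.mod_lt j hK
      by_cases hm : j % K = 0
      · have hbs : K * (j / K) = j := by omega
        simp [hm, hbs, segMax, gOf]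
      · have hne : ((j % K : Nat) : Int) ≠ 0 := by exact_mod_cast hm
        simp only [beq_iff_eq, hne, if_false]
        have hj1 : 1 ≤ j := by omega
        have hdiv : (j - 1) / K = j / K := pred_div hK hm
        rw [ih (j - 1) (by omega), hdiv]
        have hb : K * (j / K) ≤ j - 1 := by omega
        have hstep : segMax (gOf stones) (K * (j / K)) (j - K * (j / K))
            = max (segMax (gOf stones) (K * (j / K)) (j - 1 - K * (j / K)))
                  (gOf stones (K * (j / K) + (j - 1 - K * (j / K)) + 1)) := by
          rw [show j - K * (j / K) = (j - 1 - K * (j / K)) + 1 from by omega]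
          rfl
        rw [hstep, show K * (j / K) + (j - 1 - K * (j / K)) + 1 = j from by omega]
        rfl

theorem succ_div_eq {K i : Nat} (hK : 0 < K) (h : i % K ≠ K - 1) : (i + 1) / K = i / K := by
  have hdm := Nat.div_add_mod i K
  have hlt := Nat.mod_lt i hK
  have h1 : i + 1 = (i % K + 1) + K * (i / K) := by omega
  rw [h1, Nat.add_mul_div_left _ _ hK, Nat.div_eq_of_lt (by omega)]
  omega

theorem buildSuf_spec (stones : List Int) (k : Int) (hk : 1 ≤ k) :
    ∀ c, c ≤ stones.length → ∀ r < c, (buildSuf stones k c).getD r 0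
      = segMax (gOf stones) (stones.length - c + r)
          (eIdx k.toNat stones.length (stones.length - c + r) - (stones.length - c + r)) := by
  set K := k.toNat with hKdef
  set n := stones.length with hndef
  have hK : 0 < K := by omega
  have hkK : (K : Int) = k := by omega
  intro c
  induction c with
  | zero => intro _ r hr; omega
  | succ c ih =>
    intro hc r hr
    show ((if _ then _ else _) :: buildSuf stones k c).getD r 0 = _
    set i := n - (c + 1) with hidef
    have hin : i ≤ n - 1 := by omega
    rcases r with _ | r'
    · simp only [List.getD_cons_zero]
      have hmod : PySem.Int.mod (i : Int) k = ((i % K : Nat) : Int) := by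
        rw [← hkK, PySem.Int.mod_natCast]
      have hdm := Nat.div_add_mod i K
      have hlt := Nat.mod_lt i hK
      have hcond : ((PySem.Int.mod (i : Int) k == k - 1) || (i == n - 1)) = true
          ↔ (i % K = K - 1 ∨ i = n - 1) := by
        rw [Bool.or_eq_true, beq_iff_eq, beq_iff_eq, hmod, ← hkK]
        constructor
        · rintro (h | h)
          · left; omega
          · right; exact h
        · rintro (h | h)
          · left; omega
          · right; exact h
      by_cases hco : i % K = K - 1 ∨ i = n - 1
      · rw [if_pos (hcond.mpr hco)]
        have he : eIdx K n (i + 0) - (i + 0) = 0 := by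
          simp only [Nat.add_zero, eIdx]; omega
        rw [show n - (c+1) + 0 = i from by omega] at *
        rw [he]
        rfl
      · rw [if_neg (by rw [hcond]; exact hco)]
        push Not at hco
        obtain ⟨hm, hlast⟩ := hco
        have hc1 : 1 ≤ c := by omega
        have hIH := ih (by omega) 0 (by omega)
        have hi1 : n - c + 0 = i + 1 := by omega
        rw [hi1] at hIH
        have hsd : (i + 1) / K = i / K := succ_div_eq hK hm
        have heq : eIdx K n (i + 1) = eIdx K n i := by
          simp only [eIdx, hsd]
        rw [heq] at hIH
        have hei : i + 1 ≤ eIdx K n i := by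
          simp only [eIdx]; omega
        rw [hIH]
        rw [show n - (c+1) + 0 = i from by omega]
        have hstep : segMax (gOf stones) i (eIdx K n i - i)
            = max (gOf stones i) (segMax (gOf stones) (i+1) (eIdx K n i - (i+1))) := by
          rw [show eIdx K n i - i = (eIdx K n i - (i+1)) + 1 from by omega, segMax_cons]
        rw [hstep, max_comm]
        rfl
    · simp only [List.getD_cons_succ]
      have := ih (by omega) r' (by omega)
      rw [this, show n - c + r' = n - (c+1) + (r' + 1) from by omega]
theorem window_split (g : Nat → Int) {K n i : Nat} (hK : 0 < K) (hin : i + K ≤ n) :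
    max (segMax g i (eIdx K n i - i))
        (segMax g (K * ((i + K - 1) / K)) ((i + K - 1) - K * ((i + K - 1) / K)))
      = segMax g i (K - 1) := by
  have hdm1 := Nat.div_add_mod i K
  have hlt1 := Nat.mod_lt i hK
  have hdm2 := Nat.div_add_mod (i + K - 1) K
  have hlt2 := Nat.mod_lt (i + K - 1) hK
  have hb1 : K * (i / K + 1) = K * (i / K) + K := by ring
  have hq : (i + K - 1) / K ≤ i / K + 1 := by
    rw [Nat.div_le_iff_le_mul_add_pred hK]
    omega
  have hq2 : K * ((i + K - 1) / K) ≤ K * (i / K) + K := by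
    calc K * ((i + K - 1) / K) ≤ K * (i / K + 1) := Nat.mul_le_mul_left K hq
    _ = K * (i / K) + K := by ring
  have hd : i + K - 1 - i = K - 1 := by omega
  rw [← hd]
  generalize hQ2 : K * ((i + K - 1) / K) = q2 at *
  generalize hQ1 : K * (i / K) = q1 at *
  have h1 : i ≤ q2 := by omega
  have h2 : q2 ≤ eIdx K n i + 1 := by simp only [eIdx, hQ1]; omega
  have h3 : i ≤ eIdx K n i := by simp only [eIdx, hQ1]; omega
  have h4 : eIdx K n i ≤ i + K - 1 := by simp only [eIdx, hQ1]; omega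
  have h5 : q2 ≤ i + K - 1 := by omega
  exact segMax_union g h1 h2 h3 h4 h5

theorem bestLoop_spec (suf pre : List Int) (k : Int) (hk : 1 ≤ k) (t : Nat) :
    bestLoop suf pre k t = winMin (fun i => max (suf.getD i 0) (pre.getD (i + k.toNat - 1) 0)) t := by
  induction t with
  | zero =>
    show max (suf.getD 0 0) (pre.getD (k.toNat - 1) 0) = max (suf.getD 0 0) (pre.getD (0 + k.toNat - 1) 0)
    rw [Nat.zero_add]
  | succ t ih =>
    show (if _ < bestLoop suf pre k t then _ else bestLoop suf pre k t) = min _ _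
    rw [ih]
    dsimp only
    rw [show t + 1 + k.toNat - 1 = t + k.toNat from by omega]
    split <;> omega

theorem B_val (stones : List Int) (k : Int) (hk : 1 ≤ k) (hkn : k ≤ (stones.length : Int)) :
    solution_alt stones k = max 1 (mval stones k.toNat) := by
  have hK : 0 < k.toNat := by omega
  have hKn : k.toNat ≤ stones.length := by omega
  unfold solution_alt mval
  rw [bestLoop_spec _ _ _ hk]
  congr 1
  apply winMin_congr
  intro i hi
  have hiK : i + k.toNat ≤ stones.length := by omega
  have hsuf := buildSuf_spec stones k hk stones.length (le_refl _) i (by omega)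
  rw [show stones.length - stones.length + i = i from by omega] at hsuf
  have hpre := buildPre_spec stones k hk stones.length (i + k.toNat - 1) (by omega)
  rw [hsuf, hpre]
  exact window_split (gOf stones) hK hiK

theorem Swin_cons (K : Nat) (mid s : Int) (t : List Int) :
    Swin K mid (s :: t) ↔ (K ≤ t.length + 1 ∧ ∀ x ∈ (s :: t).take K, x ≤ mid) ∨ Swin K mid t := by
  constructor
  · rintro ⟨i, hi, hall⟩
    rcases i with _ | j
    · left
      exact ⟨by simp at hi; omega, by simpa using hall⟩
    · right
      exact ⟨j, by simp at hi; omega, by simpa using hall⟩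
  · rintro (⟨hl, hall⟩ | ⟨j, hj, hall⟩)
    · exact ⟨0, by simp; omega, by simpa using hall⟩
    · exact ⟨j + 1, by simp; omega, by simpa using hall⟩

theorem innerCnt_le (k mid : Int) (hk : 1 ≤ k) :
    ∀ (l : List Int) (c : Int), 0 ≤ c → c < k → innerCnt k mid c l ≤ k := by
  intro l
  induction l with
  | nil => intro c h0 hc; show c ≤ k; omega
  | cons s t ih =>
    intro c h0 hc
    show (if (if s ≤ mid then c + 1 else 0) == k then _ else innerCnt k mid _ t) ≤ k
    by_cases hek : (if s ≤ mid then c + 1 else (0:Int)) = k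
    · simp [hek]
    · rw [if_neg (by simpa using hek)]
      by_cases hs : s ≤ mid
      · rw [if_pos hs] at *
        exact ih (c + 1) (by omega) (by omega)
      · rw [if_neg hs] at *
        exact ih 0 (by omega) (by omega)

theorem innerCnt_eq_iff (k mid : Int) (hk : 1 ≤ k) :
    ∀ (l : List Int) (c : Int), 0 ≤ c → c < k →
      (innerCnt k mid c l = k
        ↔ ((k - c).toNat ≤ l.length ∧ ∀ x ∈ l.take (k - c).toNat, x ≤ mid) ∨ Swin k.toNat mid l) := by
  intro l
  induction l with
  | nil =>
    intro c h0 hc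
    show (c = k ↔ _)
    constructor
    · intro h; omega
    · rintro (⟨h1, _⟩ | ⟨i, hi, _⟩)
      · simp at h1; omega
      · simp at hi; omega
  | cons s t ih =>
    intro c h0 hc
    show (if (if s ≤ mid then c + 1 else 0) == k then (if s ≤ mid then c + 1 else 0) else innerCnt k mid _ t) = k ↔ _
    rw [Swin_cons]
    by_cases hs : s ≤ mid
    · rw [if_pos hs]
      by_cases hek : c + 1 = k
      · rw [if_pos (by simpa using hek)]
        simp only [hek, true_iff]
        left
        refine ⟨by simp [show (k - c).toNat = 1 from by omega], ?_⟩
        intro x hx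
        rw [show (k - c).toNat = 1 from by omega] at hx
        simp at hx
        omega
      · rw [if_neg (by simpa using hek)]
        rw [ih (c + 1) (by omega) (by omega)]
        have htk : (k - c).toNat = (k - (c + 1)).toNat + 1 := by omega
        have hA : ((k - (c+1)).toNat ≤ t.length ∧ ∀ x ∈ t.take (k - (c+1)).toNat, x ≤ mid)
            ↔ ((k - c).toNat ≤ (s :: t).length ∧ ∀ x ∈ (s :: t).take (k - c).toNat, x ≤ mid) := by
          rw [htk, List.take_succ_cons]
          constructor
          · rintro ⟨h1, h2⟩
            refine ⟨by simp; omega, ?_⟩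
            intro x hx
            rcases List.mem_cons.mp hx with rfl | hx
            · exact hs
            · exact h2 x hx
          · rintro ⟨h1, h2⟩
            exact ⟨by simp at h1; omega, fun x hx => h2 x (List.mem_cons_of_mem _ hx)⟩
        constructor
        · rintro (hA' | hsw)
          · left; exact hA.mp hA'
          · right; right; exact hsw
        · rintro (hA' | (⟨h1, h2⟩ | hsw))
          · left; exact hA.mpr hA'
          · -- a full window at the head: weaken to the credit window
            left
            have hh2 : ∀ x ∈ t.take (k.toNat - 1), x ≤ mid := by
              intro x hx
              apply h2
              rw [show k.toNat = (k.toNat - 1) + 1 from by omega, List.take_succ_cons]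
              exact List.mem_cons_of_mem _ hx
            exact ⟨by omega, fun x hx => hh2 x (List.take_subset_take_left t (by omega) hx)⟩
          · right; exact hsw
    · rw [if_neg hs]
      rw [if_neg (by simp; omega)]
      rw [ih 0 (by omega) (by omega)]
      have hwin0 : ((k - 0).toNat ≤ t.length ∧ ∀ x ∈ t.take (k - 0).toNat, x ≤ mid) → Swin k.toNat mid t := by
        rintro ⟨h1, h2⟩
        exact ⟨0, by simpa using by omega, by simpa using fun x hx => h2 x (by simpa using hx)⟩
      constructor
      · rintro (h | hsw)
        · right; right; exact hwin0 (by simpa using h)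
        · right; right; exact hsw
      · rintro (⟨h1, h2⟩ | (⟨h1, h2⟩ | hsw))
        · exfalso
          have hmem : s ∈ (s :: t).take (k - c).toNat := by
            rw [show (k - c).toNat = ((k - c).toNat - 1) + 1 from by omega]
            simp
          exact hs (h2 s hmem)
        · exfalso
          have hmem : s ∈ (s :: t).take k.toNat := by
            rw [show k.toNat = (k.toNat - 1) + 1 from by omega]
            simp
          exact hs (h2 s hmem)
        · right; exact hsw
theorem window_forall_iff (stones : List Int) (K i : Nat) (mid : Int) (h : i + K ≤ stones.length) :
    (∀ x ∈ (stones.drop i).take K, x ≤ mid) ↔ ∀ j < K, gOf stones (i + j) ≤ mid := by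
  constructor
  · intro hall j hj
    have hlt : i + j < stones.length := by omega
    have hmem : stones[i + j] ∈ (stones.drop i).take K := by
      have hj2 : j < ((stones.drop i).take K).length := by simp; omega
      have : ((stones.drop i).take K)[j] = stones[i + j] := by
        rw [List.getElem_take, List.getElem_drop]
      rw [← this]
      exact List.getElem_mem hj2
    have := hall _ hmem
    simpa [gOf, List.getD_eq_getElem?_getD, List.getElem?_eq_getElem hlt] using this
  · intro hall x hx
    obtain ⟨j, hj, rfl⟩ := List.mem_iff_getElem.mp hx
    have hj' : j < K := by simp at hj; omega
    have hlt : i + j < stones.length := by omega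
    have : ((stones.drop i).take K)[j] = stones[i + j] := by
      rw [List.getElem_take, List.getElem_drop]
    rw [this]
    have := hall j hj'
    simpa [gOf, List.getD_eq_getElem?_getD, List.getElem?_eq_getElem hlt] using this

theorem Swin_iff_mval_le (stones : List Int) (K : Nat) (mid : Int)
    (hK : 0 < K) (hKn : K ≤ stones.length) :
    Swin K mid stones ↔ mval stones K ≤ mid := by
  constructor
  · rintro ⟨i, hi, hall⟩
    have h1 : mval stones K ≤ segMax (gOf stones) i (K - 1) :=
      winMin_le _ (by omega)
    refine le_trans h1 ?_
    rw [segMax_le_iff]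
    intro j hj
    exact (window_forall_iff stones K i mid hi).mp hall j (by omega)
  · intro h
    obtain ⟨i, hi, hEq⟩ := winMin_mem (fun i => segMax (gOf stones) i (K - 1)) (stones.length - K)
    unfold mval at h
    rw [hEq] at h
    refine ⟨i, by omega, ?_⟩
    rw [window_forall_iff stones K i mid (by omega)]
    intro j hj
    exact le_trans (le_segMax (gOf stones) i (K - 1) j (by omega)) h

theorem mval_le_max (stones : List Int) (K : Nat) (M : Int)
    (hK : 0 < K) (hKn : K ≤ stones.length)
    (hM : PySem.List.max? stones (fun x => x) = some M) :
    mval stones K ≤ M := by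
  obtain ⟨i, hi, hEq⟩ := winMin_mem (fun i => segMax (gOf stones) i (K - 1)) (stones.length - K)
  obtain ⟨j, hj, hEq2⟩ := segMax_mem (gOf stones) i (K - 1)
  have hlt : i + j < stones.length := by omega
  have hmem : stones[i + j] ∈ stones := List.getElem_mem hlt
  have := PySem.List.max?_isMax hM _ hmem
  show mval stones K ≤ M
  unfold mval
  rw [hEq, hEq2]
  simpa [gOf, List.getD_eq_getElem?_getD, List.getElem?_eq_getElem hlt] using this
theorem test_iff (stones : List Int) (k : Int) (hk : 1 ≤ k) (hkn : k ≤ (stones.length : Int))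
    (mid : Int) :
    innerCnt k mid 0 stones < k ↔ mid < mval stones k.toNat := by
  have hKpos : (0 : Nat) < k.toNat := by omega
  have hKn : k.toNat ≤ stones.length := by omega
  have hle := innerCnt_le k mid hk stones 0 (by omega) (by omega)
  have hiff := innerCnt_eq_iff k mid hk stones 0 (by omega) (by omega)
  have hSw : innerCnt k mid 0 stones = k ↔ Swin k.toNat mid stones := by
    rw [hiff]
    constructor
    · rintro (⟨h1, h2⟩ | h)
      · refine ⟨0, by simp; omega, ?_⟩
        simp only [List.drop_zero]
        intro x hx
        apply h2
        rw [show (k - 0).toNat = k.toNat from by omega]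
        exact hx
      · exact h
    · intro h; right; exact h
  rw [Swin_iff_mval_le _ _ _ hKpos hKn] at hSw
  constructor
  · intro h
    by_contra hc
    have := hSw.mpr (by omega)
    omega
  · intro h
    have : ¬ innerCnt k mid 0 stones = k := fun he => by have := hSw.mp he; omega
    omega

theorem loopA_eq (stones : List Int) (k : Int) (hk : 1 ≤ k) (hkn : k ≤ (stones.length : Int)) :
    ∀ (N : Nat) (s e : Int) (dab : Option Int),
      (e + 1 - s).toNat ≤ N → 1 ≤ s → s ≤ max 1 (mval stones k.toNat) →
      (e < max 1 (mval stones k.toNat) → dab = some (max 1 (mval stones k.toNat))) →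
      loopA stones k s e dab = some (max 1 (mval stones k.toNat)) := by
  intro N
  induction N with
  | zero =>
    intro s e dab hN h1 h2 h3
    rw [loopA, dif_neg (by omega)]
    exact h3 (by omega)
  | succ N ih =>
    intro s e dab hN h1 h2 h3
    rw [loopA]
    by_cases hse : s ≤ e
    · rw [dif_pos hse]
      have hb := PySem.Int.floordiv_two_mid_bounds (lo := s) (hi := e) hse
      set mid := PySem.Int.floordiv (s + e) 2 with hmid
      by_cases ht : innerCnt k mid 0 stones < k
      · rw [if_pos ht]
        have hlt : mid < mval stones k.toNat := (test_iff stones k hk hkn mid).mp ht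
        exact ih (mid + 1) e dab (by omega) (by omega) (by omega) h3
      · rw [if_neg ht]
        have hge : mval stones k.toNat ≤ mid := by
          have : ¬ mid < mval stones k.toNat := fun hl => ht ((test_iff stones k hk hkn mid).mpr hl)
          omega
        refine ih s (mid - 1) (some mid) (by omega) h1 h2 ?_
        intro hlt
        have : mid = max 1 (mval stones k.toNat) := by omega
        rw [this]
    · rw [dif_neg hse]
      exact h3 (by omega)

theorem A_val (stones : List Int) (k : Int)
    (hex : ∃ s ∈ stones, (1 : Int) ≤ s) (hk : 1 ≤ k) (hkn : k ≤ (stones.length : Int)) :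
    solution stones k = max 1 (mval stones k.toNat) := by
  obtain ⟨s0, hs0mem, hs0⟩ := hex
  rcases hM : PySem.List.max? stones (fun x => x) with _ | M
  · rw [PySem.List.max?_eq_none_iff] at hM
    subst hM
    simp at hs0mem
  · have hM1 : 1 ≤ M := le_trans hs0 (PySem.List.max?_isMax hM _ hs0mem)
    have hmv : mval stones k.toNat ≤ M := mval_le_max stones k.toNat M (by omega) (by omega) hM
    unfold solution
    rw [hM]
    show (loopA stones k 1 M none).getD 0 = _
    rw [loopA_eq stones k hk hkn (M + 1 - 1).toNat 1 M none (by omega) (by omega) (by omega)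
      (fun h => absurd h (by omega))]
    rfl

-- ===== VERDICT (by name: the statement is the Claim_ definition above) =====
theorem solution_spec : Claim_equal_solution := by
  intro stones k _ hPre
  obtain ⟨hex, hk, hkn⟩ := hPre
  show solution stones k = solution_alt stones k
  rw [A_val stones k hex hk hkn, B_val stones k hk hkn]
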